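-- pv_equiv track=rewrite | github.com/RhubarbJam42/INF100 | uke11Oppgaver/uke_11_oppg_3.py | card_combinations
-- ===== SOURCE A (Python) =====
-- import itertools
--
-- def card_combinations(k, n):
--     cards = [2, 3, 4, 5, 6, 7, 8, 9, 10, 11]
--     all_combinations = []
--     combinations = []
--     for i in itertools.combinations(cards, k):
--         all_combinations.append(i)
--     for j in all_combinations:
--         if tuple(itertools.accumulate(j))[k-1] == n:
--             combinations.append(j)
--     return combinations
-- ===== SOURCE B (Python) =====
-- def card_combinations(k, n):
--     cards = (2, 3, 4, 5, 6, 7, 8, 9, 10, 11)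
--
--     def helper(rest, current):
--         if len(current) == k:
--             return [current] if sum(current) == n else []
--         if not rest:
--             return []
--         x, xs = rest[0], rest[1:]
--         return helper(xs, current + (x,)) + helper(xs, current)
--
--     return helper(cards, ())
-- ===== Notes on version B (the rewrite author's own statement) =====
-- stated objective: alternative
-- what changed: Replaces the two itertools-driven loops (materialize all combinations, then filter by indexing into accumulate) with a direct include/exclude recursive backtracking helper that tests sum(current)==n when the subset is complete.
-- crash fix: For k <= 0 A raises (IndexError for k==0 from accumulate()[k-1] on the empty tuple, ValueError from itertools.combinations for k < 0) while B returns the natural value ([()] if k==0 and n==0, else []). — e.g. on card_combinations(0, 0): A raises IndexError, B returns [[]]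
import Mathlib
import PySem

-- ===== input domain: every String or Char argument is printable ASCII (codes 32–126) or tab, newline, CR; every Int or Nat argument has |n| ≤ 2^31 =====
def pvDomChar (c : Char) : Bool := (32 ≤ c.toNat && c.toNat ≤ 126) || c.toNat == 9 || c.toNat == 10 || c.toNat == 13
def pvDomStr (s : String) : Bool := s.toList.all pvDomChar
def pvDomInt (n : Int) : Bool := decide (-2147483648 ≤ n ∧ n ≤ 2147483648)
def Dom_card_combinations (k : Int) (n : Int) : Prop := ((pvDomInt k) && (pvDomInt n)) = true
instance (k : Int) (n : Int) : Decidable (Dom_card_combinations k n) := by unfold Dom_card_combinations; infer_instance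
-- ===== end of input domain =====

-- B replaces the two itertools-driven loops with a direct include/exclude backtracking recursion (alternative decomposition, same cost).


-- ===== PORT A =====
-- itertools.accumulate on a nonempty tuple: running sums [x1, x1+x2, …]; exact hand port (no PySem primitive)
def pyAccumGo (a : Int) : List Int → List Int
  | [] => [a]
  | y :: ys => a :: pyAccumGo (a + y) ys

def pyAccum : List Int → List Int
  | [] => []
  | x :: xs => pyAccumGo x xs

def card_combinations (k : Int) (n : Int) : List (List Int) :=
  let cards : List Int := [2, 3, 4, 5, 6, 7, 8, 9, 10, 11]
  -- for i in itertools.combinations(cards, k): all_combinations.append(i)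
  let all_combinations :=
    (PySem.List.combinations cards k.toNat).foldl (fun acc i => acc ++ [i]) []
  -- for j in all_combinations: if tuple(accumulate(j))[k-1] == n: combinations.append(j)
  -- tuple(...)[k-1] is PySem.List.pyGet?; `= some n` is the comparison, none = IndexError (excluded by Pre_)
  all_combinations.foldl
    (fun acc j => if PySem.List.pyGet? (pyAccum j) (k - 1) = some n then acc ++ [j] else acc) []

-- ===== PORT B =====
def btHelper (k n : Int) (rest current : List Int) : List (List Int) :=
  if (current.length : Int) = k then
    if current.sum = n then [current] else []
  else
    match rest with
    | [] => []
    | x :: xs => btHelper k n xs (current ++ [x]) ++ btHelper k n xs current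
termination_by rest.length

def card_combinations_alt (k : Int) (n : Int) : List (List Int) :=
  btHelper k n [2, 3, 4, 5, 6, 7, 8, 9, 10, 11] []

-- ===== PRECONDITION & SPEC =====
-- Pre_ excludes exactly k ≤ 0, where A raises (IndexError for k == 0, ValueError for k < 0).
def Pre_card_combinations (k : Int) (n : Int) : Prop := 1 ≤ k
instance (k : Int) (n : Int) : Decidable (Pre_card_combinations k n) := by
  unfold Pre_card_combinations; infer_instance

def pvWitness_card_combinations : Int × Int := (2, 5)

-- For k ≤ 0 A raises (IndexError on k == 0, ValueError on k < 0) while B returns [[]] when k == 0 ∧ n == 0 and [] otherwise.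
def Raises_card_combinations (k : Int) (n : Int) : Prop := k ≤ 0
instance (k : Int) (n : Int) : Decidable (Raises_card_combinations k n) := by
  unfold Raises_card_combinations; infer_instance

def pvRaiseWitness_card_combinations : Int × Int := (0, 0)
def pvRaiseWitnessOut_card_combinations : List (List Int) := [[]]

def Spec_card_combinations (k : Int) (n : Int) (out : List (List Int)) : Prop :=
  out = card_combinations_alt k n
instance (k : Int) (n : Int) (out : List (List Int)) : Decidable (Spec_card_combinations k n out) := by
  unfold Spec_card_combinations; infer_instance

-- ===== CLAIM (what is proved, stated in full; the proofs are below) =====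
def Claim_equal_card_combinations : Prop :=
  ∀ (k : Int) (n : Int), Dom_card_combinations k n → Pre_card_combinations k n →
    Spec_card_combinations k n (card_combinations k n)

def Claim_raises_card_combinations : Prop :=
  (∀ (k : Int) (n : Int), Dom_card_combinations k n → Raises_card_combinations k n →
    ¬ Pre_card_combinations k n) ∧
  (Dom_card_combinations (pvRaiseWitness_card_combinations.1) (pvRaiseWitness_card_combinations.2) ∧
   Raises_card_combinations (pvRaiseWitness_card_combinations.1) (pvRaiseWitness_card_combinations.2) ∧
   card_combinations_alt (pvRaiseWitness_card_combinations.1) (pvRaiseWitness_card_combinations.2) =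
     pvRaiseWitnessOut_card_combinations)

-- ===== LEMMAS AND PROOFS =====

-- the last running sum of accumulate is the total sum
theorem pyAccumGo_last (ys : List Int) : ∀ (a : Int), (pyAccumGo a ys)[ys.length]? = some (a + ys.sum) := by
  induction ys with
  | nil => intro a; simp [pyAccumGo]
  | cons y ys ih =>
      intro a
      simp only [pyAccumGo, List.length_cons, List.getElem?_cons_succ, ih (a + y), List.sum_cons]
      ring_nf

theorem pyAccum_sum (x : Int) (xs : List Int) :
    PySem.List.pyGet? (pyAccum (x :: xs)) ((xs.length : Int)) = some ((x :: xs).sum) := by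
  simp [pyAccum, PySem.List.pyGet?_natCast, pyAccumGo_last, List.sum_cons]

-- the backtracking helper computes the filtered combinations of the remaining deck
theorem btHelper_eq (k n : Int) (hk : 0 ≤ k) :
    ∀ (rest cur : List Int), cur.length ≤ k.toNat →
      btHelper k n rest cur =
        ((PySem.List.combinations rest (k.toNat - cur.length)).map (cur ++ ·)).filter
          (fun c => decide (c.sum = n)) := by
  intro rest
  induction rest with
  | nil =>
      intro cur hcur
      rw [btHelper]
      by_cases h : (cur.length : Int) = k
      · have : k.toNat - cur.length = 0 := by omega
        rw [this, if_pos h]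
        simp [PySem.List.combinations_zero]
        split_ifs with hs <;> simp [hs]
      · have : k.toNat - cur.length ≠ 0 := by omega
        obtain ⟨r, hr⟩ := Nat.exists_eq_succ_of_ne_zero this
        rw [if_neg h, hr]
        simp [PySem.List.combinations_nil_succ]
  | cons x xs ih =>
      intro cur hcur
      rw [btHelper]
      by_cases h : (cur.length : Int) = k
      · have : k.toNat - cur.length = 0 := by omega
        rw [this, if_pos h]
        simp [PySem.List.combinations_zero]
        split_ifs with hs <;> simp [hs]
      · have hne : k.toNat - cur.length ≠ 0 := by omega
        obtain ⟨r, hr⟩ := Nat.exists_eq_succ_of_ne_zero hne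
        rw [if_neg h, hr, PySem.List.combinations_cons_succ]
        have h1 : r = k.toNat - (cur ++ [x]).length := by simp; omega
        have h2 : r + 1 = k.toNat - cur.length := hr.symm
        rw [ih (cur ++ [x]) (by simp; omega), ih cur (by omega), ← h1, ← h2]
        simp [List.filter_append, List.map_map, Function.comp_def]

-- A's acceptance test agrees with the sum test on every produced combination
theorem condA_eq_sum (k n : Int) (hk : 1 ≤ k) (j : List Int)
    (hj : j ∈ PySem.List.combinations ([2,3,4,5,6,7,8,9,10,11] : List Int) k.toNat) :
    (PySem.List.pyGet? (pyAccum j) (k - 1) = some n) ↔ j.sum = n := by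
  have hlen : j.length = k.toNat := PySem.List.length_of_mem_combinations hj
  match j, hlen with
  | [], hlen => exact absurd hlen (by simp; omega)
  | x :: xs, hlen =>
      have hki : k - 1 = (xs.length : Int) := by
        simp only [List.length_cons] at hlen; omega
      rw [hki, pyAccum_sum]
      simp

theorem card_combinations_spec' (k n : Int) (hk : 1 ≤ k) :
    card_combinations k n = card_combinations_alt k n := by
  unfold card_combinations card_combinations_alt
  rw [btHelper_eq k n (by omega) _ [] (by simp)]
  simp only [PySem.List.foldl_append_singleton_eq_self, List.nil_append, List.length_nil,
    Nat.sub_zero]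
  rw [PySem.List.foldl_append_ite (fun j => PySem.List.pyGet? (pyAccum j) (k - 1) = some n)
    (fun j => j)]
  simp only [List.nil_append, List.map_id']
  apply List.filter_congr
  intro j hj
  simp [condA_eq_sum k n hk j hj]

-- ===== VERDICT (by name: the statement is the Claim_ definition above) =====
theorem card_combinations_spec : Claim_equal_card_combinations := by
  intro k n _ hk
  unfold Spec_card_combinations
  exact card_combinations_spec' k n hk

@[simp] theorem card_combinations_raises : Claim_raises_card_combinations := by
  unfold Claim_raises_card_combinations
  constructor
  · intro k n _ hr hp
    exact absurd hp (by unfold Pre_card_combinations Raises_card_combinations at *; omega)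
  · refine ⟨by decide, by decide, ?_⟩
    unfold card_combinations_alt pvRaiseWitness_card_combinations pvRaiseWitnessOut_card_combinations
    rw [btHelper]
    norm_num
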